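-- pv_equiv track=rewrite | github.com/nehalkarrar/codeSignal | mutate in new array - 3 elements summation.py | solution
-- ===== SOURCE A (Python) =====
-- def solution(n, a):
--     b = []
--     if n == 1:
--         b.append(a[0])
--         return b
--
--     for i in range(n):
--         if i == 0:
--             item = 0 + a[i] + a[i+1]
--             b.append(item)
--         elif i == n-1:
--             item = a[i-1] + a[i] + 0
--             b.append(item)
--         else:
--             item = a[i-1] + a[i] + a[i+1]
--             b.append(item)
--     return b
-- ===== SOURCE B (Python) =====
-- def solution(n, a):
--     p = [0]
--     for k in range(n):
--         p.append(p[-1] + a[k])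
--     return [p[min(i + 2, n)] - p[max(i - 1, 0)] for i in range(n)]
-- ===== Notes on version B (the rewrite author's own statement) =====
-- stated objective: alternative
-- what changed: Replaces the branch-per-index neighbor addition (special cases for n==1, first, last, middle) with a prefix-sum table built in one pass plus a clamped range-difference comprehension with no special cases.
import Mathlib
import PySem

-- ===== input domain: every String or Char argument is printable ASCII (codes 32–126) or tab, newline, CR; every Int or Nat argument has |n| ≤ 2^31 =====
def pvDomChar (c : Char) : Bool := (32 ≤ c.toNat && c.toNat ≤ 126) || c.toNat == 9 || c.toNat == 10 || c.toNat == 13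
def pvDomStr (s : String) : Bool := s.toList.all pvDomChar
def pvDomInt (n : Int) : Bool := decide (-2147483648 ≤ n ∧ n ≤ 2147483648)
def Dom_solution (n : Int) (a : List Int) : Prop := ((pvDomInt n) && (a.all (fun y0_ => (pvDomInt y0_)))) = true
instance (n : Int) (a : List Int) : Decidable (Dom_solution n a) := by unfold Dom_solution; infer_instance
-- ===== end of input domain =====

-- B replaces A's per-index branching by a prefix-sum table and a clamped range difference; same O(n) cost, no special cases.

-- ===== PORT A =====
-- literal port of A: explicit n == 1 special case, then a loop with first/last/middle branches,
-- each branch computing 'item' and appending it (pyGetD is only read in range under Pre_)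
def solution (n : Int) (a : List Int) : List Int :=
  if n = 1 then [PySem.List.pyGetD a 0 0]
  else
    (PySem.List.pyRange 0 n 1).foldl (fun b i =>
      b ++ [if i = 0 then 0 + PySem.List.pyGetD a i 0 + PySem.List.pyGetD a (i + 1) 0
            else if i = n - 1 then PySem.List.pyGetD a (i - 1) 0 + PySem.List.pyGetD a i 0 + 0
            else PySem.List.pyGetD a (i - 1) 0 + PySem.List.pyGetD a i 0 + PySem.List.pyGetD a (i + 1) 0]) []

-- ===== PORT B =====
-- literal port of Source B: build prefix sums p (p[-1] read via pyGetD at -1), then the comprehension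
def solution_alt (n : Int) (a : List Int) : List Int :=
  let p := (PySem.List.pyRange 0 n 1).foldl
    (fun p k => p ++ [PySem.List.pyGetD p (-1) 0 + PySem.List.pyGetD a k 0]) [(0 : Int)]
  (PySem.List.pyRange 0 n 1).map (fun i =>
    PySem.List.pyGetD p (min (i + 2) n) 0 - PySem.List.pyGetD p (max (i - 1) 0) 0)

-- ===== PRECONDITION & SPEC =====
-- Pre_ excludes exactly the inputs where A raises IndexError: n ≥ 1 with fewer than n elements in a
def Pre_solution (n : Int) (a : List Int) : Prop := n ≤ (a.length : Int)
instance (n : Int) (a : List Int) : Decidable (Pre_solution n a) := by unfold Pre_solution; infer_instance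
def pvWitness_solution : Int × List Int := (3, [1, 2, 3])

def Spec_solution (n : Int) (a : List Int) (out : List Int) : Prop := out = solution_alt n a
instance (n : Int) (a : List Int) (out : List Int) : Decidable (Spec_solution n a out) := by unfold Spec_solution; infer_instance

-- ===== CLAIM (what is proved, stated in full; the proofs are below) =====
def Claim_equal_solution : Prop := ∀ (n : Int) (a : List Int), Dom_solution n a → Pre_solution n a → Spec_solution n a (solution n a)

-- ===== LEMMAS AND PROOFS =====

-- prefix sums: the p-building fold produces the table of partial sums of a
theorem pfold (a : List Int) (m : Nat) (hm : m ≤ a.length) :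
    (PySem.List.pyRange 0 (m : Int) 1).foldl
      (fun p k => p ++ [PySem.List.pyGetD p (-1) 0 + PySem.List.pyGetD a k 0]) [(0 : Int)]
    = (List.range (m + 1)).map (fun k => ((a.take k).sum)) := by
  induction m with
  | zero => simp [PySem.List.pyRange_one_eq_nil]
  | succ m ih =>
    have hm' : m ≤ a.length := Nat.le_of_succ_le hm
    have hcast : ((m + 1 : Nat) : Int) = (m : Int) + 1 := by push_cast; ring
    rw [hcast, PySem.List.pyRange_one_succ_right (by positivity), List.foldl_append, ih hm']
    have hsplit : (List.range (m + 1)).map (fun k => ((a.take k).sum))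
        = (List.range m).map (fun k => ((a.take k).sum)) ++ [(a.take m).sum] := by
      rw [List.range_succ, List.map_append]; rfl
    simp only [List.foldl_cons, List.foldl_nil, hsplit,
      PySem.List.pyGetD_neg_one_append_singleton, PySem.List.pyGetD_natCast,
      List.map_nil]
    rw [List.getD_eq_getElem a 0 (by omega),
        show List.range (m + 1 + 1) = List.range (m + 1) ++ [m + 1] from List.range_succ,
        List.map_append, hsplit, List.append_assoc, List.append_assoc]
    simp [List.sum_take_succ a m (by omega)]

-- reading the prefix-sum table at an in-range index
theorem pget (a : List Int) (m : Nat) (j : Int) (h0 : 0 ≤ j) (h1 : j ≤ (m : Int)) :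
    PySem.List.pyGetD ((List.range (m + 1)).map (fun k => ((a.take k).sum))) j 0
    = (a.take j.toNat).sum := by
  rw [PySem.List.pyGetD_eq_getElem _ 0 h0 (by simp; omega)]
  have hj : j.toNat < m + 1 := by omega
  simp

-- ===== VERDICT (by name: the statement is the Claim_ definition above) =====
theorem solution_spec : Claim_equal_solution := by
  intro n a _ hpre
  unfold Spec_solution solution solution_alt
  unfold Pre_solution at hpre
  by_cases hn1 : n = 1
  · subst hn1
    obtain ⟨x, t, rfl⟩ : ∃ x t, a = x :: t := by cases a <;> simp_all
    have h1 : PySem.List.pyRange 0 1 = [0] := by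
      rw [show (1 : Int) = 0 + 1 from rfl]; exact PySem.List.pyRange_one_singleton 0
    simp only [h1, List.foldl_cons, List.foldl_nil, List.map_cons, List.map_nil,
      List.nil_append]
    have e1 : PySem.List.pyGetD [(0 : Int)] (-1) 0 = 0 := by decide
    rw [e1, PySem.List.pyGetD_zero_cons, zero_add]
    norm_num [PySem.List.pyGetD, PySem.List.pyGet?, PySem.List.pyIdx?]
  · simp only [hn1, if_false]
    by_cases hn0 : n ≤ 0
    · rw [PySem.List.pyRange_one_eq_nil hn0]; rfl
    · have hn2 : 2 ≤ n := by omega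
      have hnn : (n.toNat : Int) = n := by omega
      have hlen : n.toNat ≤ a.length := by omega
      rw [PySem.List.foldl_append_singleton_eq_map, List.nil_append]
      have hP := pfold a n.toNat hlen
      rw [hnn] at hP
      rw [hP]
      apply List.map_congr_left
      intro i hi
      rw [PySem.List.mem_pyRange_one] at hi
      obtain ⟨hi0, hin⟩ := hi
      have hga : ∀ j : Int, 0 ≤ j → j < n →
          PySem.List.pyGetD a j 0 = (a.take (j.toNat + 1)).sum - (a.take j.toNat).sum := by
        intro j hj0 hjn
        rw [PySem.List.pyGetD_eq_getElem a 0 hj0 (by omega),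
            List.sum_take_succ a j.toNat (by omega)]
        ring
      split_ifs with h0 hlast
      · -- i = 0
        subst h0
        rw [show min ((0 : Int) + 2) n = 2 by omega, show max ((0 : Int) - 1) 0 = 0 by omega,
            pget a n.toNat 2 (by omega) (by omega), pget a n.toNat 0 (by omega) (by omega),
            hga 0 (by omega) (by omega), hga (0 + 1) (by omega) (by omega),
            show ((0 : Int) + 1).toNat = 1 from rfl, show ((0 : Int)).toNat = 0 from rfl,
            show ((2 : Int)).toNat = 2 from rfl]
        ring
      · -- i = n - 1
        subst hlast
        rw [show min (n - 1 + 2) n = n by omega, show max (n - 1 - 1) 0 = n - 2 by omega,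
            pget a n.toNat n (by omega) (by omega), pget a n.toNat (n - 2) (by omega) (by omega),
            hga (n - 1 - 1) (by omega) (by omega), hga (n - 1) (by omega) (by omega),
            show (n - 1 - 1).toNat = (n - 2).toNat by omega,
            show (n - 2).toNat + 1 = (n - 1).toNat by omega,
            show (n - 1).toNat + 1 = n.toNat by omega]
        ring
      · -- middle
        rw [show min (i + 2) n = i + 2 by omega, show max (i - 1) 0 = i - 1 by omega,
            pget a n.toNat (i + 2) (by omega) (by omega),
            pget a n.toNat (i - 1) (by omega) (by omega),
            hga (i - 1) (by omega) (by omega), hga i hi0 hin, hga (i + 1) (by omega) (by omega),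
            show (i - 1).toNat + 1 = i.toNat by omega,
            show i.toNat + 1 = (i + 1).toNat by omega,
            show (i + 1).toNat + 1 = (i + 2).toNat by omega]
        ring
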